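-- pv_equiv track=rewrite | github.com/dantechguy/texttool | textwrapper.py | get_delimiter_index_list
-- ===== SOURCE A (Python) =====
-- def get_delimiter_index_list(text, wrap_characters):
--     delimiter_index_dictionary = {
--         character: []
--         for character in wrap_characters }
--
--     for index, character in enumerate(text):
--         if character in delimiter_index_dictionary:
--             delimiter_index_dictionary[character].append(index)
--
--     delimiter_index_list = []
--     for character in wrap_characters:
--         delimiter_index_list.extend(delimiter_index_dictionary[character][::-1])
--
--     return delimiter_index_list
-- ===== SOURCE B (Python) =====
-- def get_delimiter_index_list(text, wrap_characters):
--     # Dictionary-free: for each wrap character, scan the text backwards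
--     # collecting the indices where it occurs.
--     result = []
--     for character in wrap_characters:
--         result += [index for index in range(len(text) - 1, -1, -1)
--                    if text[index] == character]
--     return result
-- ===== Notes on version B (the rewrite author's own statement) =====
-- stated objective: simpler
-- what changed: Replaces the dictionary-grouping pass (build dict of empty lists, one indexing pass appending, then per-character reversed extraction) with a direct per-character backward scan of the text, concatenating the matching indices.
import Mathlib
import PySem

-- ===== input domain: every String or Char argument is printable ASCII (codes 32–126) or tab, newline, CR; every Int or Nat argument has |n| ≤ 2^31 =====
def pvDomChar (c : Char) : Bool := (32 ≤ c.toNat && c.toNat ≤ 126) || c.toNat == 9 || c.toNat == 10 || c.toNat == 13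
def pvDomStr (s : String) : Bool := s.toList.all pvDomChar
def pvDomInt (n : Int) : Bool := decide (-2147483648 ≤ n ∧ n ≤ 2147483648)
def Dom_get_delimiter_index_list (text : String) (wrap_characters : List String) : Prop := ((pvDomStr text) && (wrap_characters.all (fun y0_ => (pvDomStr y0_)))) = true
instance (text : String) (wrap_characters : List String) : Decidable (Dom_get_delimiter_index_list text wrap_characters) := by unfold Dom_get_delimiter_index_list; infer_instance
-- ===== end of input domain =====

-- B replaces A's dictionary grouping with a per-wrap-character backward scan of the text (simpler; not faster).

-- ===== PORT A =====
-- body of "for index, character in enumerate(text): if character in dict: dict[character].append(index)"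
-- (a character of the text is the one-char string String.ofList [c]; .append via Dict.modify,
--  exact here since the key is present when the branch is taken)
def pvStepA (d : PySem.Dict String (List Int)) (p : Int × Char) : PySem.Dict String (List Int) :=
  if d.contains (String.ofList [p.2]) then d.modify (String.ofList [p.2]) [] (fun l => l ++ [p.1]) else d

def get_delimiter_index_list (text : String) (wrap_characters : List String) : List Int :=
  -- {character: [] for character in wrap_characters}
  let delimiter_index_dictionary : PySem.Dict String (List Int) :=
    wrap_characters.foldl (fun d character => d.insert character []) PySem.Dict.empty
  let d2 := (PySem.List.enumerate text.toList).foldl pvStepA delimiter_index_dictionary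
  -- for character in wrap_characters: result.extend(dict[character][::-1])
  -- (dict[character] never raises: every wrap character is a key; getD [] is exact)
  wrap_characters.foldl
    (fun delimiter_index_list character =>
      delimiter_index_list ++ (PySem.List.slice? (d2.getD character []) none none (-1)).getD [])
    []

-- ===== PORT B =====
def get_delimiter_index_list_alt (text : String) (wrap_characters : List String) : List Int :=
  wrap_characters.foldl
    (fun result character =>
      result ++
        (PySem.List.pyRange (PySem.Str.len text - 1) (-1) (-1)).filter
          (fun index => (PySem.Str.pyGet? text index).map (fun ch => String.ofList [ch]) == some character))
    []

-- ===== PRECONDITION & SPEC =====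
def Spec_get_delimiter_index_list (text : String) (wrap_characters : List String) (out : List Int) : Prop := out = get_delimiter_index_list_alt text wrap_characters
instance (text : String) (wrap_characters : List String) (out : List Int) : Decidable (Spec_get_delimiter_index_list text wrap_characters out) := by unfold Spec_get_delimiter_index_list; infer_instance

-- ===== CLAIM (what is proved, stated in full; the proofs are below) =====
def Claim_equal_get_delimiter_index_list : Prop := ∀ (text : String) (wrap_characters : List String), Dom_get_delimiter_index_list text wrap_characters → Spec_get_delimiter_index_list text wrap_characters (get_delimiter_index_list text wrap_characters)

-- ===== LEMMAS AND PROOFS =====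

-- The per-character group both programs produce: indices of text where the one-char
-- string equals c, in text order.
def pvGroup (t : List Char) (c : String) : List Int :=
  ((PySem.List.enumerate t).filter (fun p => String.ofList [p.2] == c)).map (·.1)

-- keys of the initial dict: exactly the wrap characters (plus whatever was there)
theorem pv_contains_init (ws : List String) (d : PySem.Dict String (List Int)) (c : String) :
    (ws.foldl (fun d character => d.insert character []) d).contains c
      = (d.contains c || decide (c ∈ ws)) := by
  induction ws generalizing d with
  | nil => simp
  | cons w ws ih =>
      rw [List.foldl_cons, ih, PySem.Dict.contains_insert]
      by_cases h : c = w
      · simp [h]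
      · have hb : (c == w) = false := by simp [h]
        simp [hb, h]

-- initial dict maps every key to []
theorem pv_getD_init (ws : List String) (d : PySem.Dict String (List Int)) (c : String)
    (h : d.getD c [] = []) :
    (ws.foldl (fun d character => d.insert character []) d).getD c [] = [] := by
  induction ws generalizing d with
  | nil => simpa using h
  | cons w ws ih =>
      rw [List.foldl_cons]
      apply ih
      by_cases hc : c = w
      · subst hc; exact PySem.Dict.getD_insert_self _ _ _ _
      · rw [PySem.Dict.getD_insert_of_ne _ _ _ hc]; exact h

theorem pv_contains_stepA (d : PySem.Dict String (List Int)) (p : Int × Char) (c : String)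
    (hc : d.contains c = true) : (pvStepA d p).contains c = true := by
  unfold pvStepA
  split
  · simp [PySem.Dict.contains_modify, hc]
  · exact hc

-- invariant of A's indexing pass
theorem pv_fold_inv (l : List (Int × Char)) (d : PySem.Dict String (List Int)) (c : String)
    (hc : d.contains c = true) :
    (l.foldl pvStepA d).getD c []
      = d.getD c [] ++ ((l.filter (fun p => String.ofList [p.2] == c)).map (·.1)) := by
  induction l generalizing d with
  | nil => simp
  | cons p l ih =>
      rw [List.foldl_cons, ih _ (pv_contains_stepA d p c hc), List.filter_cons]
      by_cases hk : String.ofList [p.2] = c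
      · have hstep : (pvStepA d p).getD c [] = d.getD c [] ++ [p.1] := by
          unfold pvStepA
          rw [hk]
          simp [hc]
        simp [hstep, hk]
      · have hstep : (pvStepA d p).getD c [] = d.getD c [] := by
          unfold pvStepA
          split
          · rw [PySem.Dict.getD_modify, if_neg (fun h => hk h.symm)]
          · rfl
        simp [hstep, hk]

-- B's backward scan produces the reversed group
theorem pv_alt_group (text : String) (c : String) :
    (PySem.List.pyRange (PySem.Str.len text - 1) (-1) (-1)).filter
        (fun index => (PySem.Str.pyGet? text index).map (fun ch => String.ofList [ch]) == some c)
      = (pvGroup text.toList c).reverse := by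
  have hr : PySem.List.pyRange (PySem.Str.len text - 1) (-1) (-1)
      = (PySem.List.pyRange 0 (text.toList.length : Int) 1).reverse := by
    rw [PySem.List.pyRange_neg_one_eq_reverse]
    simp [PySem.Str.len_eq]
  rw [hr, List.filter_reverse]
  congr 1
  have he : PySem.List.pyRange 0 (text.toList.length : Int) 1
      = (PySem.List.enumerate text.toList).map (·.1) := by
    simpa using (PySem.List.map_fst_enumerate text.toList 0).symm
  rw [he, List.filter_map, pvGroup]
  congr 1
  apply List.filter_congr
  intro p hp
  rcases (PySem.List.mem_enumerate_iff _ _ _).mp hp with ⟨k, hk, rfl⟩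
  simp [List.getElem?_eq_getElem hk]

theorem get_delimiter_index_list_eq (text : String) (wrap_characters : List String) :
    get_delimiter_index_list text wrap_characters
      = get_delimiter_index_list_alt text wrap_characters := by
  unfold get_delimiter_index_list get_delimiter_index_list_alt
  apply PySem.List.foldl_congr_mem
  intro acc c hc
  rw [pv_alt_group]
  have hcontains : ((wrap_characters.foldl (fun d character => d.insert character [])
      (PySem.Dict.empty : PySem.Dict String (List Int))).contains c) = true := by
    rw [pv_contains_init]
    simp [hc]
  rw [pv_fold_inv _ _ _ hcontains,
    pv_getD_init _ _ _ (by simp), PySem.List.slice?_none_none_neg_one]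
  simp [pvGroup]

-- ===== VERDICT (by name: the statement is the Claim_ definition above) =====
theorem get_delimiter_index_list_spec : Claim_equal_get_delimiter_index_list := by
  intro text wrap_characters _
  unfold Spec_get_delimiter_index_list
  exact get_delimiter_index_list_eq text wrap_characters
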